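-- pv_equiv track=rewrite | github.com/dariabutova16-arch/-_- | main.py1.py | sum_between_positives
-- ===== SOURCE A (Python) =====
-- def sum_between_positives(arr):
--     first = None
--     second = None
--
--     for i in range(len(arr)):
--         if arr[i] > 0:
--             if first is None:
--                 first = i
--             else:
--                 second = i
--                 break
--
--     if first is None or second is None or second == first + 1:
--         return 0
--
--     s = 0
--     for i in range(first + 1, second):
--         s += arr[i]
--
--     return s
-- ===== SOURCE B (Python) =====
-- def sum_between_positives(arr):
--     seen_first = False
--     s = 0
--     for x in arr:
--         if x > 0:
--             if seen_first:
--                 return s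
--             seen_first = True
--         elif seen_first:
--             s += x
--     return 0
-- ===== Notes on version B (the rewrite author's own statement) =====
-- stated objective: simpler
-- what changed: Replaced A's two-phase index scan (find the indices of the first two positives, then a second indexed loop summing between them) by one fused pass over the elements that accumulates the between-region inline and returns as soon as the second positive appears.
import Mathlib
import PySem

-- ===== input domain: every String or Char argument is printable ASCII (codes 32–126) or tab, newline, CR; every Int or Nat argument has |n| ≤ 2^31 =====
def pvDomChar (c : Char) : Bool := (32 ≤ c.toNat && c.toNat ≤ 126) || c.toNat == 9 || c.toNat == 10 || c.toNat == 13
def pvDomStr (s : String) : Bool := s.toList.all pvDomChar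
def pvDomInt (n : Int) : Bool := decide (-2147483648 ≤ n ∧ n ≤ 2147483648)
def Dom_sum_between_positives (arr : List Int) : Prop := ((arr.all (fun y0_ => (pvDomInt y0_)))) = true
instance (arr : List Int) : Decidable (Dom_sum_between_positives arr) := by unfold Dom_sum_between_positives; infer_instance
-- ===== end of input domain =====

-- B fuses A's index-finding loop and its separate summation loop into one pass with an inline accumulator (objective: simpler).

-- ===== PORT A =====
-- A's first loop: scan indices i = 0,1,… for the positions of the first two positive
-- elements, stopping (break) as soon as the second is found.  Indices are Nats (Python's here are ≥ 0).
def pvFindA (arr : List Int) (i : Nat) (first : Option Nat) : Option Nat × Option Nat :=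
  if h : i < arr.length then
    if arr[i] > 0 then
      match first with
      | none => pvFindA arr (i + 1) (some i)
      | some f => (some f, some i)
    else pvFindA arr (i + 1) first
  else (first, none)
termination_by arr.length - i

def sum_between_positives (arr : List Int) : Int :=
  match pvFindA arr 0 none with
  | (some f, some j) =>
      if j = f + 1 then 0
      else
        -- Python's 'for i in range(first+1, second): s += arr[i]' (all these indices are in range):
        (List.range' (f + 1) (j - (f + 1))).foldl (fun s k => s + arr.getD k 0) 0
  | _ => 0

-- ===== PORT B =====
def pvLoopB (l : List Int) (seen : Bool) (s : Int) : Int :=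
  match l with
  | [] => 0
  | x :: t =>
      if x > 0 then
        if seen then s else pvLoopB t true s
      else if seen then pvLoopB t true (s + x)
      else pvLoopB t false s

def sum_between_positives_alt (arr : List Int) : Int := pvLoopB arr false 0

-- ===== PRECONDITION & SPEC =====
def Spec_sum_between_positives (arr : List Int) (out : Int) : Prop := out = sum_between_positives_alt arr
instance (arr : List Int) (out : Int) : Decidable (Spec_sum_between_positives arr out) := by unfold Spec_sum_between_positives; infer_instance

-- ===== CLAIM (what is proved, stated in full; the proofs are below) =====
def Claim_equal_sum_between_positives : Prop := ∀ (arr : List Int), Dom_sum_between_positives arr → Spec_sum_between_positives arr (sum_between_positives arr)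

-- ===== LEMMAS AND PROOFS =====

-- the "non-positive" predicate both characterisations are phrased with
def pvNP : Int → Bool := fun x => decide (x ≤ 0)

-- common characterisation of the result
def pvSpec (l : List Int) : Int :=
  match l.dropWhile pvNP with
  | [] => 0
  | _ :: t => if t.dropWhile pvNP = [] then 0 else (t.takeWhile pvNP).sum

theorem pvNP_false {x : Int} (hx : 0 < x) : pvNP x = false := by
  simp only [pvNP, decide_eq_false_iff_not]; omega

theorem pvNP_true {x : Int} (hx : ¬ 0 < x) : pvNP x = true := by
  simp only [pvNP, decide_eq_true_eq]; omega

theorem dw_cons_false {x : Int} {t : List Int} (hp : pvNP x = false) :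
    (x :: t).dropWhile pvNP = x :: t := by
  simp [hp]

theorem dw_cons_true {x : Int} {t : List Int} (hp : pvNP x = true) :
    (x :: t).dropWhile pvNP = t.dropWhile pvNP := by
  simp [hp]

theorem tw_cons_false {x : Int} {t : List Int} (hp : pvNP x = false) :
    (x :: t).takeWhile pvNP = [] := by
  simp [hp]

theorem tw_cons_true {x : Int} {t : List Int} (hp : pvNP x = true) :
    (x :: t).takeWhile pvNP = x :: t.takeWhile pvNP := by
  simp [hp]

theorem dropWhile_eq_drop_len {α : Type} (p : α → Bool) (l : List α) :
    l.dropWhile p = l.drop ((l.takeWhile p).length) := by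
  induction l with
  | nil => rfl
  | cons x t ih =>
      by_cases hp : p x = true
      · simp [hp, ih]
      · simp [hp]

theorem take_len_takeWhile {α : Type} (p : α → Bool) (l : List α) :
    l.take ((l.takeWhile p).length) = l.takeWhile p := by
  induction l with
  | nil => rfl
  | cons x t ih =>
      by_cases hp : p x = true
      · simp [hp, ih]
      · simp [hp]

-- ---- B side ----

theorem pvLoopB_true (l : List Int) : ∀ s : Int,
    pvLoopB l true s = if l.dropWhile pvNP = [] then 0 else s + (l.takeWhile pvNP).sum := by
  induction l with
  | nil => intro s; simp [pvLoopB]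
  | cons x t ih =>
      intro s
      by_cases hx : x > 0
      · have hp := pvNP_false hx
        rw [dw_cons_false hp, tw_cons_false hp]
        simp [pvLoopB, hx]
      · have hp := pvNP_true hx
        rw [dw_cons_true hp, tw_cons_true hp]
        have hl : pvLoopB (x :: t) true s = pvLoopB t true (s + x) := by
          simp [pvLoopB, hx]
        rw [hl, ih (s + x)]
        split
        · rfl
        · rw [List.sum_cons]; ring

theorem pvLoopB_false (l : List Int) : ∀ s : Int,
    pvLoopB l false s =
      (match l.dropWhile pvNP with
       | [] => 0
       | _ :: t => pvLoopB t true s) := by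
  induction l with
  | nil => intro s; simp [pvLoopB]
  | cons x t ih =>
      intro s
      by_cases hx : x > 0
      · have hl : pvLoopB (x :: t) false s = pvLoopB t true s := by
          simp [pvLoopB, hx]
        rw [hl, dw_cons_false (pvNP_false hx)]
      · have hl : pvLoopB (x :: t) false s = pvLoopB t false s := by
          simp [pvLoopB, hx]
        rw [hl, ih s, dw_cons_true (pvNP_true hx)]

theorem alt_eq_spec (arr : List Int) : sum_between_positives_alt arr = pvSpec arr := by
  unfold sum_between_positives_alt pvSpec
  rw [pvLoopB_false]
  cases h : arr.dropWhile pvNP with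
  | nil => rfl
  | cons y t => simp [pvLoopB_true t 0]

-- ---- A side ----

theorem foldl_range'_sum (arr : List Int) : ∀ (n a : Nat) (s : Int),
    (List.range' a n).foldl (fun s k => s + arr.getD k 0) s
      = s + ((arr.drop a).take n).sum := by
  intro n
  induction n with
  | zero => intro a s; simp
  | succ m ih =>
      intro a s
      rw [List.range'_succ, List.foldl_cons, ih]
      by_cases h : a < arr.length
      · conv_rhs => rw [List.drop_eq_getElem_cons h]
        rw [List.take_succ_cons, List.sum_cons]
        have hg : arr.getD a 0 = arr[a] := by
          rw [List.getD_eq_getElem?_getD, List.getElem?_eq_getElem h]; rfl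
        rw [hg]; ring
      · have hd : arr.drop a = [] := List.drop_eq_nil_of_le (by omega)
        have hd' : arr.drop (a + 1) = [] := List.drop_eq_nil_of_le (by omega)
        have hg : arr.getD a 0 = 0 := by
          rw [List.getD_eq_getElem?_getD, List.getElem?_eq_none (by omega : arr.length ≤ a)]; rfl
        rw [hd, hd', hg]; simp

theorem pvFindA_some (arr : List Int) : ∀ (k i f : Nat), arr.length - i = k →
    pvFindA arr i (some f) =
      (some f,
       if (arr.drop i).dropWhile pvNP = [] then none
       else some (i + ((arr.drop i).takeWhile pvNP).length)) := by
  intro k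
  induction k with
  | zero =>
      intro i f hk
      have hi : arr.length ≤ i := by omega
      rw [pvFindA, dif_neg (by omega : ¬ i < arr.length), List.drop_eq_nil_of_le hi]
      rfl
  | succ m ih =>
      intro i f hk
      have hi : i < arr.length := by omega
      have hcons := List.drop_eq_getElem_cons hi
      rw [pvFindA, dif_pos hi]
      by_cases hx : arr[i] > 0
      · have hp := pvNP_false hx
        conv_rhs => rw [hcons]
        rw [dw_cons_false hp, tw_cons_false hp, if_pos hx]
        simp
        exact hi
      · have hp := pvNP_true hx
        conv_rhs => rw [hcons]
        rw [dw_cons_true hp, tw_cons_true hp, List.length_cons, if_neg hx,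
          ih (i + 1) f (by omega)]
        have harith : i + 1 + ((arr.drop (i + 1)).takeWhile pvNP).length
            = i + (((arr.drop (i + 1)).takeWhile pvNP).length + 1) := by omega
        rw [harith]

theorem pvFindA_none (arr : List Int) : ∀ (k i : Nat), arr.length - i = k →
    pvFindA arr i none =
      (match (arr.drop i).dropWhile pvNP with
       | [] => (none, none)
       | _ :: _ =>
           pvFindA arr (i + ((arr.drop i).takeWhile pvNP).length + 1)
             (some (i + ((arr.drop i).takeWhile pvNP).length))) := by
  intro k
  induction k with
  | zero =>
      intro i hk
      have hi : arr.length ≤ i := by omega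
      rw [pvFindA, dif_neg (by omega : ¬ i < arr.length), List.drop_eq_nil_of_le hi]
      rfl
  | succ m ih =>
      intro i hk
      have hi : i < arr.length := by omega
      have hcons := List.drop_eq_getElem_cons hi
      rw [pvFindA, dif_pos hi]
      by_cases hx : arr[i] > 0
      · have hp := pvNP_false hx
        conv_rhs => rw [hcons]
        rw [dw_cons_false hp, tw_cons_false hp, if_pos hx]
        rfl
      · have hp := pvNP_true hx
        conv_rhs => rw [hcons]
        rw [dw_cons_true hp, tw_cons_true hp, List.length_cons, if_neg hx,
          ih (i + 1) (by omega)]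
        have harith : i + 1 + ((arr.drop (i + 1)).takeWhile pvNP).length
            = i + (((arr.drop (i + 1)).takeWhile pvNP).length + 1) := by omega
        rw [harith]

theorem a_eq_spec (arr : List Int) : sum_between_positives arr = pvSpec arr := by
  unfold sum_between_positives pvSpec
  rw [pvFindA_none arr (arr.length - 0) 0 rfl]
  simp only [List.drop_zero, Nat.zero_add]
  cases h : arr.dropWhile pvNP with
  | nil => rfl
  | cons y t =>
      set m := (arr.takeWhile pvNP).length with hm
      have hdw : arr.dropWhile pvNP = arr.drop m := dropWhile_eq_drop_len pvNP arr
      have hmlt : m < arr.length := by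
        by_contra hge
        rw [List.drop_eq_nil_of_le (by omega)] at hdw
        rw [hdw] at h; exact List.cons_ne_nil y t h.symm
      have hc : y :: t = arr[m] :: arr.drop (m + 1) := by
        rw [← h, hdw, List.drop_eq_getElem_cons hmlt]
      have ht : t = arr.drop (m + 1) := (List.cons_eq_cons.mp hc).2
      rw [pvFindA_some arr (arr.length - (m + 1)) (m + 1) m rfl, ← ht]
      cases h2 : t.dropWhile pvNP with
      | nil =>
          rw [if_pos rfl]
          show (0 : Int) = if List.dropWhile pvNP t = [] then 0 else (t.takeWhile pvNP).sum
          rw [if_pos h2]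
      | cons z u =>
          rw [if_neg (List.cons_ne_nil z u)]
          set n := (t.takeWhile pvNP).length with hn
          have hsum : (List.range' (m + 1) (m + 1 + n - (m + 1))).foldl
              (fun s k => s + arr.getD k 0) 0 = (t.takeWhile pvNP).sum := by
            have he : m + 1 + n - (m + 1) = n := by omega
            rw [he, foldl_range'_sum, ← ht, hn, take_len_takeWhile]
            ring
          by_cases hadj : m + 1 + n = m + 1
          · have hlen0 : (t.takeWhile pvNP).length = 0 := by omega
            have htw : t.takeWhile pvNP = [] := by
              cases hcase : t.takeWhile pvNP with
              | nil => rfl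
              | cons a b => rw [hcase] at hlen0; simp at hlen0
            show (if m + 1 + n = m + 1 then (0 : Int)
                  else (List.range' (m + 1) (m + 1 + n - (m + 1))).foldl
                    (fun s k => s + arr.getD k 0) 0)
                = if List.dropWhile pvNP t = [] then 0 else (t.takeWhile pvNP).sum
            rw [if_pos hadj, if_neg (by simp [h2]), htw]
            simp
          · show (if m + 1 + n = m + 1 then (0 : Int)
                  else (List.range' (m + 1) (m + 1 + n - (m + 1))).foldl
                    (fun s k => s + arr.getD k 0) 0)
                = if List.dropWhile pvNP t = [] then 0 else (t.takeWhile pvNP).sum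
            rw [if_neg hadj, if_neg (by simp [h2]), hsum]

-- ===== VERDICT (by name: the statement is the Claim_ definition above) =====
theorem sum_between_positives_spec : Claim_equal_sum_between_positives := by
  intro arr _
  unfold Spec_sum_between_positives
  rw [a_eq_spec, alt_eq_spec]
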